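-- pv_equiv track=rewrite | github.com/Burak-Ibrahim-Unal/Python_Projects | Python Programming/Soru1.py | multipl
-- ===== SOURCE A (Python) =====
-- def multipl(list):
--     result=1
--     for i in range(len(list)):
--         if list[i]==min(list) or list[i]==max(list):
--             continue
--         else:
--             result *= list[i]
--     return  result
-- ===== SOURCE B (Python) =====
-- def multipl(list):
--     s = sorted(list)
--     if not s:
--         return 1
--     lo, hi = s[0], s[-1]
--     p = 1
--     for x in s[s.count(lo): len(s) - s.count(hi)]:
--         p *= x
--     return p
-- ===== Notes on version B (the rewrite author's own statement) =====
-- stated objective: faster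
-- what changed: A re-scans the whole list for min() and max() at every loop iteration; B sorts a copy once and multiplies the slice between the leading min-run and the trailing max-run (counts give the slice bounds).
import Mathlib
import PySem

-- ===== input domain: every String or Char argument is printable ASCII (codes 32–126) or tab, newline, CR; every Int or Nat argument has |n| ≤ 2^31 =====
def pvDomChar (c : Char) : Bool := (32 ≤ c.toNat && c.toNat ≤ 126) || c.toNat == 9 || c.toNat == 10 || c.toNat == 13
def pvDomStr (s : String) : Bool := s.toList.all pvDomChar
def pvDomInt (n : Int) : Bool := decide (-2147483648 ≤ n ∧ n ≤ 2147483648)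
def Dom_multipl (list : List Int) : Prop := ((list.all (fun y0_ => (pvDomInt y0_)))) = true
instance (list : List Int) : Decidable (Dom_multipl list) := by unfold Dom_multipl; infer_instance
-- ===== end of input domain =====

-- B sorts a copy once and takes the product of the slice between the leading min-run
-- and the trailing max-run (objective: faster — A recomputes min/max inside the loop).


-- ===== PORT A =====
def multipl (list : List Int) : Int :=
  (PySem.List.pyRange 0 (list.length : Int) 1).foldl
    (fun result i =>
      if some (PySem.List.pyGetD list i 0) = PySem.List.min? list (fun y => y)
          ∨ some (PySem.List.pyGetD list i 0) = PySem.List.max? list (fun y => y)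
      then result
      else result * PySem.List.pyGetD list i 0) 1

-- ===== PORT B =====
def multipl_alt (list : List Int) : Int :=
  let s := PySem.List.sorted list (fun x => x) false
  if s = [] then 1
  else
    let lo := PySem.List.pyGetD s 0 0
    let hi := PySem.List.pyGetD s (-1) 0
    (PySem.List.slice s (some ((s.count lo : Nat) : Int))
        (some ((s.length : Int) - ((s.count hi : Nat) : Int)))).foldl (fun p x => p * x) 1

-- ===== PRECONDITION & SPEC =====
def Spec_multipl (list : List Int) (out : Int) : Prop := out = multipl_alt list
instance (list : List Int) (out : Int) : Decidable (Spec_multipl list out) := by unfold Spec_multipl; infer_instance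

-- ===== CLAIM (what is proved, stated in full; the proofs are below) =====
def Claim_equal_multipl : Prop := ∀ (list : List Int), Dom_multipl list → Spec_multipl list (multipl list)

-- ===== LEMMAS AND PROOFS =====

-- skipping loop = product of the filtered list
theorem foldl_skip (p : Int → Prop) [DecidablePred p] :
    ∀ (l : List Int) (a : Int),
      l.foldl (fun r x => if p x then r else r * x) a
        = a * (l.filter (fun x => decide ¬ p x)).prod := by
  intro l
  induction l with
  | nil => simp
  | cons h t ih =>
    intro a
    by_cases hp : p h <;> simp [List.foldl_cons, hp, ih, mul_assoc]

-- in a sorted list whose elements are all ≥ v, dropping count v removes exactly the v's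
theorem drop_count_sorted (v : Int) :
    ∀ (l : List Int), l.Pairwise (· ≤ ·) → (∀ y ∈ l, v ≤ y) →
      l.drop (l.count v) = l.filter (fun x => x ≠ v) := by
  intro l
  induction l with
  | nil => simp
  | cons h t ih =>
    intro hpw hmin
    rcases List.pairwise_cons.mp hpw with ⟨hht, hpt⟩
    by_cases hv : h = v
    · subst hv
      simp only [List.count_cons_self, List.filter_cons]
      simp only [ne_eq, not_true_eq_false, decide_false]
      have := ih hpt (fun y hy => hmin y (List.mem_cons_of_mem _ hy))
      simpa using this
    · have hlt : v < h := lt_of_le_of_ne (hmin h (List.mem_cons_self)) (fun e => hv e.symm)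
      have hnone : ∀ y ∈ h :: t, y ≠ v := by
        intro y hy
        rcases List.mem_cons.mp hy with rfl | hy'
        · exact hv
        · exact fun e => absurd (e ▸ hht y hy') (not_le.mpr hlt)
      have hc : (h :: t).count v = 0 := by
        rw [List.count_eq_zero]
        intro hmem; exact hnone v hmem rfl
      rw [hc, List.drop_zero, List.filter_eq_self.mpr]
      intro y hy; simpa using hnone y hy
-- in a sorted list whose elements are all ≤ v, taking length - count v removes exactly the v's
theorem take_count_sorted (v : Int) :
    ∀ (l : List Int), l.Pairwise (· ≤ ·) → (∀ y ∈ l, y ≤ v) →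
      l.take (l.length - l.count v) = l.filter (fun x => x ≠ v) := by
  intro l
  induction l with
  | nil => simp
  | cons h t ih =>
    intro hpw hmax
    rcases List.pairwise_cons.mp hpw with ⟨hht, hpt⟩
    by_cases hv : h = v
    · subst hv
      have hall : ∀ y ∈ h :: t, y = h := by
        intro y hy
        rcases List.mem_cons.mp hy with rfl | hy'
        · rfl
        · exact le_antisymm (hmax y hy) (hht y hy')
      have hc : (h :: t).count h = (h :: t).length := by
        rw [List.count_eq_length]
        intro y hy; exact ((hall y hy) ▸ rfl)
      rw [hc, Nat.sub_self, List.take_zero, Eq.comm, List.filter_eq_nil_iff]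
      intro y hy; simp [hall y hy]
    · have hcle : t.count v ≤ t.length := List.count_le_length
      have hc : (h :: t).count v = t.count v := by
        simp [hv]
      rw [hc]
      have hlen : (h :: t).length - t.count v = (t.length - t.count v) + 1 := by
        simp [List.length_cons]; omega
      rw [hlen, List.take_succ_cons, List.filter_cons]
      rw [ih hpt (fun y hy => hmax y (List.mem_cons_of_mem _ hy))]
      simp [hv]

theorem pairwise_le_getLast :
    ∀ (l : List Int) (h : l ≠ []), l.Pairwise (· ≤ ·) → ∀ y ∈ l, y ≤ l.getLast h := by
  intro l
  induction l with
  | nil => simp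
  | cons a t ih =>
    intro _ hpw y hy
    rcases List.pairwise_cons.mp hpw with ⟨hht, hpt⟩
    cases t with
    | nil => simp at hy; simp [hy]
    | cons b u =>
      rw [List.getLast_cons (by simp)]
      rcases List.mem_cons.mp hy with rfl | hy'
      · exact le_trans (hht _ (List.getLast_mem _)) (le_refl _)
      · exact ih (by simp) hpt y hy'

theorem pyGetD_zero_head (l : List Int) (h : l ≠ []) (d : Int) :
    PySem.List.pyGetD l 0 d = l.head h := by
  cases l with
  | nil => simp at h
  | cons a t => simp [PySem.List.pyGetD_zero_cons]

theorem pairwise_head_le (l : List Int) (h : l ≠ []) (hpw : l.Pairwise (· ≤ ·)) :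
    ∀ y ∈ l, l.head h ≤ y := by
  cases l with
  | nil => simp at h
  | cons a t =>
    intro y hy
    rcases List.mem_cons.mp hy with rfl | hy'
    · simp
    · exact (List.pairwise_cons.mp hpw).1 y hy'

-- ===== VERDICT (by name: the statement is the Claim_ definition above) =====
theorem multipl_spec : Claim_equal_multipl := by
  intro list _
  unfold Spec_multipl
  by_cases hnil : list = []
  · subst hnil; decide
  -- notation
  set s := PySem.List.sorted list (fun x => x) false with hs_def
  have hperm : s.Perm list := PySem.List.sorted_perm list (fun x => x) false
  have hs : s ≠ [] := by
    intro e
    exact hnil (List.eq_nil_of_length_eq_zero (by rw [← hperm.length_eq, e]; rfl))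
  have hpw : s.Pairwise (· ≤ ·) := by
    have := PySem.List.sorted_pairwise list (fun x => x); simpa [hs_def] using this
  set lo := s.head hs with hlo_def
  set hi := s.getLast hs with hhi_def
  have hmem_iff : ∀ x : Int, x ∈ s ↔ x ∈ list := fun x => hperm.mem_iff
  have hlo_all : ∀ y ∈ s, lo ≤ y := pairwise_head_le s hs hpw
  have hhi_all : ∀ y ∈ s, y ≤ hi := pairwise_le_getLast s hs hpw
  -- min?/max? of list are lo/hi
  have hmin : PySem.List.min? list (fun y => y) = some lo := by
    cases e : PySem.List.min? list (fun y => y) with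
    | none => exact absurd ((PySem.List.min?_eq_none_iff list (fun y => y)).mp e) hnil
    | some m =>
      have hm_mem : m ∈ s := (hmem_iff m).mpr (PySem.List.min?_mem e)
      have hm_min : ∀ y ∈ list, m ≤ y := by
        have := PySem.List.min?_isMin e; simpa using this
      have : m = lo := le_antisymm (hm_min lo ((hmem_iff lo).mp (List.head_mem hs)))
        (hlo_all m hm_mem)
      rw [this]
  have hmax : PySem.List.max? list (fun y => y) = some hi := by
    cases e : PySem.List.max? list (fun y => y) with
    | none => exact absurd ((PySem.List.max?_eq_none_iff list (fun y => y)).mp e) hnil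
    | some m =>
      have hm_mem : m ∈ s := (hmem_iff m).mpr (PySem.List.max?_mem e)
      have hm_max : ∀ y ∈ list, y ≤ m := by
        have := PySem.List.max?_isMax e; simpa using this
      have : m = hi := le_antisymm (hhi_all m hm_mem)
        (hm_max hi ((hmem_iff hi).mp (List.getLast_mem hs)))
      rw [this]
  -- A's value: product of the filtered original list
  have hA : multipl list = (list.filter (fun x => decide ¬ (x = lo ∨ x = hi))).prod := by
    unfold multipl
    rw [PySem.List.foldl_pyRange_zero_pyGetD' list 0
      (fun result x => if some x = PySem.List.min? list (fun y => y)
          ∨ some x = PySem.List.max? list (fun y => y) then result else result * x) 1]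
    rw [hmin, hmax]
    simp only [Option.some.injEq]
    rw [foldl_skip (fun x => x = lo ∨ x = hi) list 1, one_mul]
  -- B's value
  have hlo_get : PySem.List.pyGetD s 0 0 = lo := pyGetD_zero_head s hs 0
  have hhi_get : PySem.List.pyGetD s (-1) 0 = hi := PySem.List.pyGetD_neg_one (xs := s) 0 hs
  have hB : multipl_alt list
      = (((s.drop (s.count lo)).take (s.length - s.count hi - s.count lo))).prod := by
    unfold multipl_alt
    rw [← hs_def]
    rw [if_neg hs, hlo_get, hhi_get]
    dsimp only
    rw [PySem.List.slice_toNat s (Int.natCast_nonneg _)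
      (by have := List.count_le_length (l := s) (a := hi); omega)]
    rw [← List.prod_eq_foldl]
    have h1 : ((s.length : Int) - ((s.count hi : Nat) : Int)).toNat = s.length - s.count hi := by
      omega
    have h2 : (((s.count lo : Nat)) : Int).toNat = s.count lo := by omega
    rw [h1, h2]
  have hdrop : s.drop (s.count lo) = s.filter (fun x => x ≠ lo) :=
    drop_count_sorted lo s hpw hlo_all
  by_cases hlohi : lo = hi
  · -- all elements equal: both products are 1
    have hall : ∀ y ∈ s, y = lo := fun y hy =>
      le_antisymm (hlohi ▸ hhi_all y hy) (hlo_all y hy)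
    have hcnt : s.count lo = s.length := by
      rw [List.count_eq_length]; intro y hy; exact ((hall y hy) ▸ rfl)
    rw [hA, hB, hcnt]
    rw [List.drop_length]
    simp only [List.take_nil, List.prod_nil]
    rw [List.filter_eq_nil_iff.mpr, List.prod_nil]
    intro y hy
    have : y = lo := hall y ((hmem_iff y).mpr hy)
    simp [this]
  · -- lo < hi : the slice is exactly the elements strictly between
    set t := s.filter (fun x => x ≠ lo) with ht_def
    have ht_len : t.length = s.length - s.count lo := by
      rw [← hdrop]; simp
    have ht_cnt : t.count hi = s.count hi := by
      rw [ht_def, List.count_filter]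
      simp [Ne.symm hlohi]
    have ht_pw : t.Pairwise (· ≤ ·) := hpw.sublist List.filter_sublist
    have ht_hi : ∀ y ∈ t, y ≤ hi := fun y hy => hhi_all y (List.mem_of_mem_filter hy)
    have htake : t.take (t.length - t.count hi) = t.filter (fun x => x ≠ hi) :=
      take_count_sorted hi t ht_pw ht_hi
    rw [hA, hB, hdrop]
    have harg : s.length - s.count hi - s.count lo = t.length - t.count hi := by
      omega
    rw [harg, htake, ht_def, List.filter_filter]
    refine (List.Perm.prod_eq ?_).symm
    refine List.Perm.trans (List.Perm.filter _ hperm) ?_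
    refine (List.filter_congr ?_).symm ▸ List.Perm.refl _
    intro x _
    by_cases h1 : x = lo <;> by_cases h2 : x = hi <;> simp [h1, h2]
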